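-- pv_equiv track=rewrite | github.com/ysparrk/Algorithm | 프로그래머스/2/150369. 택배 배달과 수거하기/택배 배달과 수거하기.py | check_vertex
-- ===== SOURCE A (Python) =====
-- def check_vertex(box, n, cap):
--
--     vertex = []
--
--     i = n - 1
--     while i >= 0:
--
--         cnt = cap
--         if box[i]:
--             vertex.append(i + 1)
--
--             # cap 만큼 채우기
--             while cnt > 0 and i >= 0:
--
--                 if box[i] == 0:
--                     i -= 1
--                 else:
--                     box[i] -= 1
--                     cnt -= 1
--         else:
--             i -= 1
--
--     return vertex
-- ===== SOURCE B (Python) =====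
-- def check_vertex(box, n, cap):
--     # Batch version: consume min(cap, remaining) boxes per trip instead of one
--     # unit at a time, carrying the leftover trip capacity down the positions.
--     # Does NOT mutate box; the return value is the same.
--     vertex = []
--     rem = 0  # capacity left over from the trip currently in progress
--     for i in range(n - 1, -1, -1):
--         b = box[i]
--         if b == 0:
--             continue
--         t = min(rem, b)
--         b -= t
--         rem -= t
--         while b > 0:
--             vertex.append(i + 1)
--             take = min(cap, b)
--             b -= take
--             rem = cap - take
--     return vertex
-- ===== Notes on version B (the rewrite author's own statement) =====
-- stated objective: alternative
-- what changed: A removes boxes one unit at a time with a mutating while-loop, costing O(sum of box values); B scans the positions once from the end carrying the leftover trip capacity and subtracts min(cap, remaining) per trip, costing O(n + length of the output) (output-sensitive: a timing run saw A time out where B returned, but with cap=1 the output itself is sum-sized, so no uniform speed-up is claimed). B does not mutate box (A zeroes it in place) -- the equivalence is about the return value only.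
import Mathlib
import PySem

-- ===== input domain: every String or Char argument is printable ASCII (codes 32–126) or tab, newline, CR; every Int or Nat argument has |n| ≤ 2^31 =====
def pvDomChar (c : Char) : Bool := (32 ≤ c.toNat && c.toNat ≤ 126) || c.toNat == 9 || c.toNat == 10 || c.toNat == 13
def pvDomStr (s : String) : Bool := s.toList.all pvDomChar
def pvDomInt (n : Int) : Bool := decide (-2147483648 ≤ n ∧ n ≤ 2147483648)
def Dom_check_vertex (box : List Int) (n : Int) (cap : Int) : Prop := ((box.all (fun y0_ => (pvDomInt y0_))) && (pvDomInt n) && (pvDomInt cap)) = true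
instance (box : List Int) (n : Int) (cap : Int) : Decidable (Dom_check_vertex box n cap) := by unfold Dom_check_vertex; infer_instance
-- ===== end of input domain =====

-- B batch-subtracts min(cap, remaining) per trip instead of A's unit-at-a-time mutation loop,
-- one pass over the positions carrying the leftover capacity (cost O(n + output length)).
-- A mutates box in place (zeroes it), B does not — the equivalence proved here is about the
-- RETURN value only.


-- ===== PORT A =====
-- box[i] for 0 ≤ i (exact where i is in range; A only reads indices 0..n-1)
def pvVal (box : List Int) (i : Int) : Int := (PySem.List.pyGet? box i).getD 0

-- Σ of the (clamped) first m entries; used only to size the fuel of the outer loop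
def pvSumTake (box : List Int) (m : Nat) : Nat := ((box.take m).map Int.toNat).sum

-- A's inner `while cnt > 0 and i >= 0` loop; always terminates, so no fuel needed
def innerA (box : List Int) (i : Int) (cnt : Int) : List Int × Int :=
  if h : 0 < cnt ∧ 0 ≤ i then
    if pvVal box i = 0 then innerA box (i - 1) cnt
    else innerA (box.set i.toNat (pvVal box i - 1)) i (cnt - 1)
  else (box, i)
  termination_by cnt.toNat + (i + 1).toNat
  decreasing_by all_goals omega

-- A's outer `while i >= 0` loop; the fuel only makes the recursion total (Python A
-- diverges outside Pre_); on Pre_ it is proved never to run out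
def outerA (box : List Int) (cap : Int) (i : Int) (vertex : List Int) : Nat → List Int
  | 0 => vertex
  | fuel + 1 =>
    if 0 ≤ i then
      if pvVal box i ≠ 0 then
        let p := innerA box i cap
        outerA p.1 cap p.2 (vertex ++ [i + 1]) fuel
      else outerA box cap (i - 1) vertex fuel
    else vertex

def check_vertex (box : List Int) (n : Int) (cap : Int) : List Int :=
  outerA box cap (n - 1) [] (pvSumTake box n.toNat + n.toNat + 1)

-- ===== PORT B =====
-- Source B's `while b > 0` trip loop; fuel b.toNat is a bound on its iterations (take ≥ 1 on Pre_)
def tripLoop (i : Int) (cap : Int) : Nat → Int → Int → List Int → Int × List Int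
  | 0, _, rem, acc => (rem, acc)
  | f + 1, b, rem, acc =>
    if 0 < b then
      let take := min cap b
      tripLoop i cap f (b - take) (cap - take) (acc ++ [i + 1])
    else (rem, acc)

-- Source B's `for i in range(n-1, -1, -1)` loop; k-1 is the current position
def altLoop (box : List Int) (cap : Int) : Nat → Int → List Int → List Int
  | 0, _, acc => acc
  | k + 1, rem, acc =>
    let b0 := pvVal box (k : Int)
    if b0 = 0 then altLoop box cap k rem acc
    else
      let t := min rem b0
      let p := tripLoop (k : Int) cap (b0 - t).toNat (b0 - t) (rem - t) acc
      altLoop box cap k p.1 p.2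

def check_vertex_alt (box : List Int) (n : Int) (cap : Int) : List Int :=
  altLoop box cap n.toNat 0 []

-- ===== PRECONDITION & SPEC =====
-- Pre_ = exactly where Python A terminates normally: indices 0..n-1 must exist, those box
-- values must be non-negative and cap ≥ 1 — except that with no parcel at all (all zeros)
-- A also terminates for any cap.  Outside this A raises IndexError or loops forever.
def Pre_check_vertex (box : List Int) (n : Int) (cap : Int) : Prop :=
  n ≤ (box.length : Int) ∧ (∀ x ∈ box.take n.toNat, 0 ≤ x) ∧
    (1 ≤ cap ∨ ∀ x ∈ box.take n.toNat, x = 0)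
instance (box : List Int) (n : Int) (cap : Int) : Decidable (Pre_check_vertex box n cap) := by
  unfold Pre_check_vertex; infer_instance

def pvWitness_check_vertex : List Int × Int × Int := ([2, 0, 3], 3, 2)

def Spec_check_vertex (box : List Int) (n : Int) (cap : Int) (out : List Int) : Prop := out = check_vertex_alt box n cap
instance (box : List Int) (n : Int) (cap : Int) (out : List Int) : Decidable (Spec_check_vertex box n cap out) := by unfold Spec_check_vertex; infer_instance

-- ===== CLAIM (what is proved, stated in full; the proofs are below) =====
def Claim_equal_check_vertex : Prop := ∀ (box : List Int) (n : Int) (cap : Int), Dom_check_vertex box n cap → Pre_check_vertex box n cap → Spec_check_vertex box n cap (check_vertex box n cap)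

-- ===== LEMMAS AND PROOFS =====

-- measure of A's outer loop: remaining parcels at positions ≤ i, plus i itself
def pvM (box : List Int) (i : Int) : Nat := pvSumTake box (i + 1).toNat + (i + 1).toNat

lemma pvVal_of_nonneg (box : List Int) (i : Int) (h : 0 ≤ i) :
    pvVal box i = box.getD i.toNat 0 := by
  simp [pvVal, PySem.List.pyGet?_of_nonneg box h, List.getD_eq_getElem?_getD]

lemma pvSumTake_succ (box : List Int) (m : Nat) (h : m < box.length) :
    pvSumTake box (m + 1) = pvSumTake box m + (box.getD m 0).toNat := by
  have h1 : pvSumTake box m = ((box.map Int.toNat).take m).sum := by simp [pvSumTake, List.map_take]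
  have h2 : m < (box.map Int.toNat).length := by simpa using h
  rw [h1, pvSumTake, List.map_take, List.sum_take_succ _ _ h2]
  simp [List.getD_eq_getElem?_getD, List.getElem?_eq_getElem h]

lemma pvSumTake_set (box : List Int) (m : Nat) (x : Int) :
    pvSumTake (box.set m x) m = pvSumTake box m := by
  have : (box.set m x).take m = box.take m := by
    apply List.ext_getElem
    · simp
    · intro i h1 h2
      have him : i < m := by simp at h1; omega
      simp [List.getElem_take, him.ne']
  rw [pvSumTake, this]; rfl

lemma altLoop_congr (cap : Int) :
    ∀ (k : Nat) (box1 box2 : List Int) (rem : Int) (acc : List Int),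
      (∀ j : Nat, j < k → pvVal box1 (j : Int) = pvVal box2 (j : Int)) →
      altLoop box1 cap k rem acc = altLoop box2 cap k rem acc := by
  intro k
  induction k with
  | zero => intro box1 box2 rem acc h; rfl
  | succ k ih =>
    intro box1 box2 rem acc h
    have hk := h k (by omega)
    simp only [altLoop, hk]
    have h' : ∀ j : Nat, j < k → pvVal box1 (j : Int) = pvVal box2 (j : Int) :=
      fun j hj => h j (by omega)
    split
    · exact ih _ _ _ _ h'
    · exact ih _ _ _ _ h' 

lemma tripLoop_fuel (i cap : Int) (hcap : 1 ≤ cap) :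
    ∀ (f g : Nat) (b rem : Int) (acc : List Int), b.toNat ≤ f → b.toNat ≤ g →
      tripLoop i cap f b rem acc = tripLoop i cap g b rem acc := by
  intro f
  induction f with
  | zero =>
    intro g b rem acc hf hg
    have hb : ¬ 0 < b := by omega
    cases g with
    | zero => rfl
    | succ g => simp [tripLoop, hb]
  | succ f ih =>
    intro g b rem acc hf hg
    by_cases hb : 0 < b
    · cases g with
      | zero => omega
      | succ g =>
        simp only [tripLoop, hb, if_pos]
        apply ih
        · have : 1 ≤ min cap b := by omega
          omega
        · have : 1 ≤ min cap b := by omega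
          omega
    · cases g with
      | zero => simp [tripLoop, hb]
      | succ g => simp [tripLoop, hb]

-- the inner loop's post-state bundle: shape invariants, the measure bound, and the
-- simulation step (B's absorb cascade with rem = cnt reaches the same state)
lemma innerA_spec (cap : Int) :
    ∀ (box : List Int) (i cnt : Int), 0 ≤ cnt → i < (box.length : Int) →
      (∀ j : Nat, (j : Int) ≤ i → 0 ≤ box.getD j 0) →
      (innerA box i cnt).1.length = box.length ∧
      (innerA box i cnt).2 ≤ i ∧
      (∀ j : Nat, (j : Int) ≤ (innerA box i cnt).2 → 0 ≤ (innerA box i cnt).1.getD j 0) ∧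
      pvM (innerA box i cnt).1 (innerA box i cnt).2 ≤ pvM box i ∧
      (∀ acc : List Int,
        altLoop box cap (i + 1).toNat cnt acc
          = altLoop (innerA box i cnt).1 cap ((innerA box i cnt).2 + 1).toNat 0 acc) := by
  intro box i cnt
  induction box, i, cnt using innerA.induct with
  | case1 box i cnt h hv ih =>
    intro hcnt hlen hnn
    have hlen' : i - 1 < (box.length : Int) := by omega
    have hnn' : ∀ j : Nat, (j : Int) ≤ i - 1 → 0 ≤ box.getD j 0 := fun j hj => hnn j (by omega)
    obtain ⟨ih1, ih2, ih3, ih4, ih5⟩ := ih hcnt hlen' hnn'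
    rw [innerA]; simp only [dif_pos h, if_pos hv]
    have hm : i.toNat < box.length := by omega
    have hvv : box.getD i.toNat 0 = 0 := by
      rw [← pvVal_of_nonneg box i h.2]; exact hv
    refine ⟨ih1, by omega, ih3, ?_, ?_⟩
    · refine le_trans ih4 ?_
      have e1 : ((i - 1) + 1).toNat = i.toNat := by omega
      have e2 : (i + 1).toNat = i.toNat + 1 := by omega
      simp only [pvM, e1, e2, pvSumTake_succ box i.toNat hm, hvv]
      omega
    · intro acc
      have e2 : (i + 1).toNat = i.toNat + 1 := by omega
      rw [e2]
      simp only [altLoop]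
      have hb0 : pvVal box (i.toNat : Int) = 0 := by
        rw [Int.toNat_of_nonneg h.2]; exact hv
      rw [if_pos hb0]
      have e1 : ((i - 1) + 1).toNat = i.toNat := by omega
      rw [← e1]
      exact ih5 acc
  | case2 box i cnt h hv ih =>
    intro hcnt hlen hnn
    have hi0 : 0 ≤ i := h.2
    have hm : i.toNat < box.length := by omega
    have hveq : pvVal box i = box.getD i.toNat 0 := pvVal_of_nonneg box i hi0
    have hv1 : 1 ≤ pvVal box i := by
      have := hnn i.toNat (by omega)
      rw [hveq]; rw [hveq] at hv; omega
    set v := pvVal box i with hvdef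
    set box2 := box.set i.toNat (v - 1) with hbox2
    -- getD of box2
    have hgd : ∀ j : Nat, box2.getD j 0 = if j = i.toNat then v - 1 else box.getD j 0 := by
      intro j
      by_cases hji : j = i.toNat
      · subst hji
        simp [hbox2, List.getD_eq_getElem?_getD, hm]
      · have hji' : i.toNat ≠ j := by omega
        simp [hbox2, List.getD_eq_getElem?_getD, hji, hji']
    have hlen2 : i < (box2.length : Int) := by simpa [hbox2] using hlen
    have hnn2 : ∀ j : Nat, (j : Int) ≤ i → 0 ≤ box2.getD j 0 := by
      intro j hj
      rw [hgd j]
      split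
      · omega
      · exact hnn j hj
    obtain ⟨ih1, ih2, ih3, ih4, ih5⟩ := ih (by omega) hlen2 hnn2
    rw [innerA]; simp only [dif_pos h]
    rw [← hvdef, ← hbox2, if_neg hv]
    have hlen2' : box2.length = box.length := by simp [hbox2]
    refine ⟨ih1.trans hlen2', by omega, ih3, ?_, ?_⟩
    · have hM2 : pvM box2 i ≤ pvM box i := by
        have e2 : (i + 1).toNat = i.toNat + 1 := by omega
        have hm2 : i.toNat < box2.length := by omega
        simp only [pvM, e2, pvSumTake_succ box i.toNat hm, pvSumTake_succ box2 i.toNat hm2]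
        rw [hbox2, pvSumTake_set, hgd i.toNat]
        rw [← hveq]
        omega
      exact le_trans ih4 hM2
    · intro acc
      rw [← ih5 acc]
      -- goal: altLoop box cap (i+1).toNat cnt acc = altLoop box2 cap (i+1).toNat (cnt-1) acc
      have e2 : (i + 1).toNat = i.toNat + 1 := by omega
      rw [e2]
      have hcast : ((i.toNat : Nat) : Int) = i := Int.toNat_of_nonneg hi0
      have hb0 : pvVal box (i.toNat : Int) = v := by rw [hcast, hvdef]
      have hb0' : pvVal box2 (i.toNat : Int) = v - 1 := by
        rw [pvVal_of_nonneg box2 _ (by omega), Int.toNat_natCast, hgd i.toNat, if_pos rfl]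
      have hcong : ∀ j : Nat, j < i.toNat → pvVal box (j : Int) = pvVal box2 (j : Int) := by
        intro j hj
        rw [pvVal_of_nonneg box _ (by omega), pvVal_of_nonneg box2 _ (by omega)]
        simp only [Int.toNat_natCast]
        rw [hgd j, if_neg (by omega)]
      by_cases hv2 : v = 1
      · simp only [altLoop, hb0, hb0', hv2]
        norm_num
        have ht : min cnt (1:Int) = 1 := by omega
        rw [ht]
        norm_num [tripLoop]
        exact altLoop_congr cap i.toNat box box2 (cnt - 1) acc hcong
      · have hvge : 2 ≤ v := by omega
        simp only [altLoop, hb0, hb0']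
        rw [if_neg (by omega), if_neg (by omega)]
        have ht : min (cnt - 1) (v - 1) = min cnt v - 1 := by omega
        rw [ht]
        have e3 : v - 1 - (min cnt v - 1) = v - min cnt v := by ring
        have e4 : cnt - 1 - (min cnt v - 1) = cnt - min cnt v := by ring
        rw [e3, e4]
        exact altLoop_congr cap i.toNat box box2 _ _ hcong
  | case3 box i cnt h =>
    intro hcnt hlen hnn
    rw [innerA]; simp only [dif_neg h]
    refine ⟨by trivial, le_refl _, hnn, le_refl _, ?_⟩
    intro acc
    by_cases hc : 0 < cnt
    · have hi : (i + 1).toNat = 0 := by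
        rcases not_and_or.mp h with h1 | h2
        · omega
        · omega
      rw [hi]
      rfl
    · have : cnt = 0 := by omega
      rw [this]

lemma outer_sim (cap : Int) :
    ∀ (fuel : Nat) (box : List Int) (i : Int) (acc : List Int),
      i < (box.length : Int) →
      (∀ j : Nat, (j : Int) ≤ i → 0 ≤ box.getD j 0) →
      (1 ≤ cap ∨ ∀ j : Nat, (j : Int) ≤ i → box.getD j 0 = 0) →
      pvM box i < fuel →
      outerA box cap i acc fuel = altLoop box cap (i + 1).toNat 0 acc := by
  intro fuel
  induction fuel with
  | zero => intro box i acc _ _ _ h4; omega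
  | succ fuel ih =>
    intro box i acc hlen hnn hcap hfuel
    by_cases hi : 0 ≤ i
    · have hm : i.toNat < box.length := by omega
      have hcast : ((i.toNat : Nat) : Int) = i := Int.toNat_of_nonneg hi
      have e2 : (i + 1).toNat = i.toNat + 1 := by omega
      have hveq : pvVal box i = box.getD i.toNat 0 := pvVal_of_nonneg box i hi
      have hb0 : pvVal box ((i.toNat : Nat) : Int) = pvVal box i := by rw [hcast]
      by_cases hv : pvVal box i = 0
      · -- skip case
        simp only [outerA, if_pos hi]
        rw [if_neg (not_not_intro hv)]
        have hMlt : pvM box (i - 1) < pvM box i := by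
          have e1 : ((i - 1) + 1).toNat = i.toNat := by omega
          simp only [pvM, e1, e2, pvSumTake_succ box i.toNat hm]
          have : (box.getD i.toNat 0).toNat = 0 := by rw [← hveq, hv]; rfl
          omega
        rw [ih box (i - 1) acc (by omega) (fun j hj => hnn j (by omega))
          (hcap.imp id fun hz j hj => hz j (by omega)) (by omega)]
        rw [e2]
        simp only [altLoop, hb0]
        rw [if_pos hv]
        have e1 : ((i - 1) + 1).toNat = i.toNat := by omega
        rw [e1]
      · -- trip case
        have hv1 : 1 ≤ pvVal box i := by
          have := hnn i.toNat (by omega)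
          rw [hveq] at hv ⊢; omega
        have hcap1 : 1 ≤ cap := by
          rcases hcap with hc | hz
          · exact hc
          · exact absurd (by rw [hveq, hz i.toNat (by omega)] : pvVal box i = 0) hv
        set v := pvVal box i with hvdef
        set box2 := box.set i.toNat (v - 1) with hbox2
        have hstep : innerA box i cap = innerA box2 i (cap - 1) := by
          rw [innerA, dif_pos ⟨by omega, hi⟩, ← hvdef, ← hbox2, if_neg hv]
        have hgd : ∀ j : Nat, box2.getD j 0 = if j = i.toNat then v - 1 else box.getD j 0 := by
          intro j
          by_cases hji : j = i.toNat
          · subst hji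
            simp [hbox2, List.getD_eq_getElem?_getD, hm]
          · have hji' : i.toNat ≠ j := by omega
            simp [hbox2, List.getD_eq_getElem?_getD, hji, hji']
        have hlen2 : i < (box2.length : Int) := by simpa [hbox2] using hlen
        have hnn2 : ∀ j : Nat, (j : Int) ≤ i → 0 ≤ box2.getD j 0 := by
          intro j hj
          rw [hgd j]; split
          · omega
          · exact hnn j hj
        obtain ⟨l2, ile2, nn2, M2, _⟩ := innerA_spec cap box2 i (cap - 1) (by omega) hlen2 hnn2
        obtain ⟨-, -, -, -, sim1⟩ := innerA_spec cap box i cap (by omega) hlen hnn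
        have hMeq : pvM box2 i < pvM box i := by
          have hm2 : i.toNat < box2.length := by simp [hbox2]; omega
          have hgdi : box2.getD i.toNat 0 = v - 1 := by rw [hgd i.toNat]; exact if_pos rfl
          simp only [pvM, e2]
          rw [pvSumTake_succ box i.toNat hm, pvSumTake_succ box2 i.toNat hm2, hgdi, hbox2,
            pvSumTake_set, ← hveq]
          omega
        simp only [outerA, if_pos hi]
        rw [if_pos hv]
        rw [hstep] at sim1 ⊢
        have hlen2' : box2.length = box.length := by simp [hbox2]
        rw [ih (innerA box2 i (cap - 1)).1 (innerA box2 i (cap - 1)).2 (acc ++ [i + 1])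
          (by rw [l2, hlen2']; omega) nn2 (Or.inl hcap1) (by omega)]
        rw [← sim1 (acc ++ [i + 1])]
        -- KEY step
        rw [e2]
        simp only [altLoop, hb0]
        rw [if_neg hv, if_neg hv]
        have ht0 : min (0 : Int) v = 0 := by omega
        rw [ht0]
        have hsv : (v - 0) = v := by ring
        rw [hsv]
        have hmincap : min cap v = min cap v := rfl
        have hvtn : v.toNat = (v - min cap v).toNat + ((min cap v).toNat) := by omega
        have htake1 : 1 ≤ min cap v := by omega
        -- peel one iteration of the LHS tripLoop
        have hpeel : tripLoop ((i.toNat : Nat) : Int) cap v.toNat v (0 - 0) acc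
            = tripLoop ((i.toNat : Nat) : Int) cap (v - min cap v).toNat (v - min cap v)
                (cap - min cap v) (acc ++ [((i.toNat : Nat) : Int) + 1]) := by
          have hv2 : v.toNat = (v.toNat - 1) + 1 := by omega
          rw [hv2]
          simp only [tripLoop, if_pos (show (0:Int) < v by omega)]
          exact tripLoop_fuel _ cap hcap1 _ _ _ _ _ (by omega) (by omega)
        rw [hpeel, hcast]
  -- the RHS: min cap v, rem = cap - min cap v
    · simp only [outerA, if_neg hi]
      rw [show (i + 1).toNat = 0 by omega]
      rfl

-- ===== VERDICT (by name: the statement is the Claim_ definition above) =====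
theorem check_vertex_spec : Claim_equal_check_vertex := by
  intro box n cap _ hpre
  obtain ⟨hn, hnn, hcap⟩ := hpre
  unfold Spec_check_vertex check_vertex check_vertex_alt
  by_cases hn0 : n ≤ 0
  · have h1 : n.toNat = 0 := by omega
    have h2 : ¬ (0 ≤ n - 1) := by omega
    rw [h1]
    simp [outerA, altLoop]
    intro h
    exact absurd h (by omega)
  · have hmem : ∀ j : Nat, j < n.toNat → box.getD j 0 ∈ box.take n.toNat := by
      intro j hj
      have hjl : j < box.length := by omega
      have hjt : j < (box.take n.toNat).length := by simp; omega
      have he : (box.take n.toNat)[j]'hjt = box[j]'hjl := by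
        simp [List.getElem_take]
      rw [List.getD_eq_getElem?_getD, List.getElem?_eq_getElem hjl]
      simp only [Option.getD_some]
      rw [← he]
      exact List.getElem_mem _
    have hnn' : ∀ j : Nat, (j : Int) ≤ n - 1 → 0 ≤ box.getD j 0 := by
      intro j hj
      exact hnn _ (hmem j (by omega))
    have hcap' : 1 ≤ cap ∨ ∀ j : Nat, (j : Int) ≤ n - 1 → box.getD j 0 = 0 := by
      refine hcap.imp id fun hz j hj => hz _ (hmem j (by omega))
    have e : (n - 1 + 1).toNat = n.toNat := by omega
    have hfuel : pvM box (n - 1) < pvSumTake box n.toNat + n.toNat + 1 := by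
      simp only [pvM, e]; omega
    rw [outer_sim cap _ box (n - 1) [] (by omega) hnn' hcap' hfuel, e]
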